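-- pv_equiv track=rewrite | github.com/You2751/LeetCode_Solutions | 1874-form-array-by-concatenating-subarrays-of-another-array/form-array-by-concatenating-subarrays-of-another-array.py | canChoose
-- ===== SOURCE A (Python) =====
-- from typing import List
--
-- def canChoose(groups: List[List[int]], nums: List[int]) -> bool:
--     left = right = 0
--     while(left < len(groups) and right <= len(nums) - len(groups[left])):
--         group = groups[left]
--         check_group = nums[right:right + len(group)]
--         if(group == check_group):
--             right += len(group)
--             left += 1
--         else:
--             right += 1
--     return left == len(groups)
-- ===== SOURCE B (Python) =====
-- from typing import List
--
-- def canChoose(groups: List[List[int]], nums: List[int]) -> bool: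
--     # Index-based search: build a position index value -> sorted list of indices
--     # once, then for each group try only the candidate start positions where its
--     # first element occurs, taking the earliest full match at or after the cursor.
--     pos = {}
--     for i, v in enumerate(nums):
--         pos[v] = pos.get(v, []) + [i]
--     n = len(nums)
--     r = 0
--     for g in groups:
--         if not g:
--             continue
--         m = len(g)
--         placed = False
--         for i in pos.get(g[0], []):
--             if i >= r and i + m <= n and all(nums[i + t] == g[t] for t in range(m)):
--                 r = i + m
--                 placed = True
--                 break
--         if not placed:
--             return False
--     return True
-- ===== Notes on version B (the rewrite author's own statement) =====
-- stated objective: faster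
-- what changed: A slides a cursor over nums comparing a slice at every offset; B first builds a hash index from value to its sorted positions in nums, then for each group probes only the candidate offsets where its first element occurs, verifying element-wise - the per-offset slice comparison at non-candidate offsets disappears.
import Mathlib
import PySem

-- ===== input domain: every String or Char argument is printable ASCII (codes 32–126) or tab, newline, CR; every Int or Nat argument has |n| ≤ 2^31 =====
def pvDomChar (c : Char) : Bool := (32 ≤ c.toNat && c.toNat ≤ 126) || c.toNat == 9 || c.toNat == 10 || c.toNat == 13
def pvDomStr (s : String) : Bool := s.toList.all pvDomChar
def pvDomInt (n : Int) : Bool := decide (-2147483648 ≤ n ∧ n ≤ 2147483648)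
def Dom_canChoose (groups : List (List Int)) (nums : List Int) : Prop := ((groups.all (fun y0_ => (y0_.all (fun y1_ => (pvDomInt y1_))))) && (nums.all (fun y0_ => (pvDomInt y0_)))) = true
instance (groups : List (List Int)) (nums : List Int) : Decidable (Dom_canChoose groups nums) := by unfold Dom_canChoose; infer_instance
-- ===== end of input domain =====

-- B replaces A's slide-and-compare scan by a value->positions hash index built once:
-- each group is placed at the earliest fitting candidate offset where its first element occurs.


-- ===== PORT A =====
-- A's single while-loop with the two cursors `left` (into groups) and `right` (into nums).
def canChooseLoop (groups : List (List Int)) (nums : List Int) (left right : Nat) : Bool :=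
  if h : left < groups.length ∧ (right : Int) ≤ (nums.length : Int) - ((groups.getD left []).length : Int) then
    let group := groups.getD left []
    let check_group := PySem.List.slice nums (some (right : Int)) (some ((right : Int) + (group.length : Int)))
    if group = check_group then
      canChooseLoop groups nums (left + 1) (right + group.length)
    else
      canChooseLoop groups nums left (right + 1)
  else
    left == groups.length
termination_by (groups.length - left, nums.length + 1 - right)
decreasing_by
  · left
    omega
  · right
    omega

def canChoose (groups : List (List Int)) (nums : List Int) : Bool :=
  canChooseLoop groups nums 0 0

-- ===== PORT B =====
-- `pos = {}; for i, v in enumerate(nums): pos[v] = pos.get(v, []) + [i]`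
def buildPos (nums : List Int) : PySem.Dict Int (List Int) :=
  (PySem.List.enumerate nums 0).foldl (fun d p => d.modify p.2 [] (· ++ [p.1])) PySem.Dict.empty

-- `all(nums[i + t] == g[t] for t in range(m))`; indices in range is guaranteed by the
-- guard `i >= r and i + m <= n` at the call site, so pyGetD's default is never read.
def pvAllEq (nums g : List Int) (i : Int) : Bool :=
  (PySem.List.pyRange 0 (g.length : Int) 1).all
    (fun t => PySem.List.pyGetD nums (i + t) 0 == PySem.List.pyGetD g t 0)

-- the inner `for i in pos.get(g[0], []): if … : break / else: return False`
def pvFindPlace (nums g : List Int) (cands : List Int) (r : Int) : Option Int :=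
  match cands with
  | [] => none
  | i :: rest =>
    if r ≤ i && i + (g.length : Int) ≤ (nums.length : Int) && pvAllEq nums g i then some i
    else pvFindPlace nums g rest r

-- the outer `for g in groups:` with the cursor r
def canChooseAltLoop (nums : List Int) (pos : PySem.Dict Int (List Int)) : List (List Int) → Int → Bool
  | [], _ => true
  | g :: gs, r =>
    if g.length = 0 then canChooseAltLoop nums pos gs r
    else
      match pvFindPlace nums g (pos.getD (PySem.List.pyGetD g 0 0) []) r with
      | none => false
      | some i => canChooseAltLoop nums pos gs (i + (g.length : Int))

def canChoose_alt (groups : List (List Int)) (nums : List Int) : Bool :=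
  canChooseAltLoop nums (buildPos nums) groups 0

-- ===== PRECONDITION & SPEC =====
def Spec_canChoose (groups : List (List Int)) (nums : List Int) (out : Bool) : Prop := out = canChoose_alt groups nums
instance (groups : List (List Int)) (nums : List Int) (out : Bool) : Decidable (Spec_canChoose groups nums out) := by unfold Spec_canChoose; infer_instance

-- ===== CLAIM (what is proved, stated in full; the proofs are below) =====
def Claim_equal_canChoose : Prop := ∀ (groups : List (List Int)) (nums : List Int), Dom_canChoose groups nums → Spec_canChoose groups nums (canChoose groups nums)

-- ===== LEMMAS AND PROOFS =====

-- The common specification: the groups can be placed, in order, as disjoint contiguous blocks.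
def CanMatch : List (List Int) → List Int → Prop
  | [], _ => True
  | g :: gs, xs => ∃ i : Nat, (xs.drop i).take g.length = g ∧ CanMatch gs (xs.drop (i + g.length))

theorem canMatch_of_drop (gs : List (List Int)) (xs : List Int) (k : Nat)
    (h : CanMatch gs (xs.drop k)) : CanMatch gs xs := by
  cases gs with
  | nil => trivial
  | cons g gs =>
    obtain ⟨i, hm, ht⟩ := h
    refine ⟨k + i, ?_, ?_⟩
    · simpa [List.drop_drop, Nat.add_comm] using hm
    · simpa [List.drop_drop, Nat.add_comm, Nat.add_assoc, Nat.add_left_comm] using ht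

theorem loopA (groups : List (List Int)) (nums : List Int) :
    ∀ left right : Nat, left ≤ groups.length → right ≤ nums.length →
      (canChooseLoop groups nums left right = true ↔
        CanMatch (groups.drop left) (nums.drop right)) := by
  intro left right
  fun_induction canChooseLoop groups nums left right with
  | case1 left right h group check_group heq ih =>
    intro hL hr
    have hlt : left < groups.length := h.1
    have h2 : (right : Int) ≤ (nums.length : Int) - (group.length : Int) := h.2
    have hbnd : right + group.length ≤ nums.length := by omega
    have hslice : check_group = (nums.drop right).take group.length :=
      PySem.List.slice_natCast_add nums right group.length
    have hgd : groups.getD left [] = groups[left] := List.getD_eq_getElem _ _ hlt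
    have hdropg : groups.drop left = group :: groups.drop (left + 1) := by
      rw [List.drop_eq_getElem_cons hlt]
      rw [show group = groups[left] from hgd]
    rw [ih (by omega) hbnd, hdropg]
    constructor
    · intro hcm
      refine ⟨0, ?_, ?_⟩
      · rw [List.drop_zero]
        exact (heq.trans hslice).symm
      · simp only [Nat.zero_add, List.drop_drop]
        exact hcm
    · rintro ⟨i, hm, ht⟩
      have e : (nums.drop right).drop (i + group.length)
          = ((nums.drop (right + group.length)).drop i) := by
        rw [List.drop_drop, List.drop_drop]
        congr 1
        omega
      rw [e] at ht
      exact canMatch_of_drop _ _ _ ht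
  | case2 left right h group check_group heq ih =>
    intro hL hr
    have hlt : left < groups.length := h.1
    have h2 : (right : Int) ≤ (nums.length : Int) - (group.length : Int) := h.2
    have hslice : check_group = (nums.drop right).take group.length :=
      PySem.List.slice_natCast_add nums right group.length
    have hg1 : 1 ≤ group.length := by
      rcases Nat.eq_zero_or_pos group.length with h0 | h1
      · exfalso
        apply heq
        rw [hslice, h0, List.take_zero]
        exact List.eq_nil_of_length_eq_zero h0
      · exact h1
    have hgd : groups.getD left [] = groups[left] := List.getD_eq_getElem _ _ hlt
    have hdropg : groups.drop left = group :: groups.drop (left + 1) := by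
      rw [List.drop_eq_getElem_cons hlt]
      rw [show group = groups[left] from hgd]
    rw [ih hL (by omega), hdropg]
    constructor
    · intro hcm
      have e : nums.drop (right + 1) = (nums.drop right).drop 1 := by
        rw [List.drop_drop]
      rw [e] at hcm
      exact canMatch_of_drop _ _ _ hcm
    · rintro ⟨i, hm, ht⟩
      cases i with
      | zero =>
        exfalso
        apply heq
        rw [List.drop_zero] at hm
        rw [hslice]
        exact hm.symm
      | succ i' =>
        refine ⟨i', ?_, ?_⟩
        · have e1 : (nums.drop (right + 1)).drop i' = (nums.drop right).drop (i' + 1) := by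
            rw [List.drop_drop, List.drop_drop]
            congr 1
            omega
          rw [e1]
          exact hm
        · have e2 : (nums.drop (right + 1)).drop (i' + group.length) = (nums.drop right).drop (i' + 1 + group.length) := by
            rw [List.drop_drop, List.drop_drop]
            congr 1
            omega
          rw [e2]
          exact ht
  | case3 left right h =>
    intro hL hr
    rcases Nat.lt_or_ge left groups.length with hlt | hge
    · have h2 : (nums.length : Int) - ((groups.getD left []).length : Int) < (right : Int) := by
        by_contra hc
        exact h ⟨hlt, by omega⟩
      have hgd : groups.getD left [] = groups[left] := List.getD_eq_getElem _ _ hlt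
      have hdropg : groups.drop left = groups[left] :: groups.drop (left + 1) :=
        List.drop_eq_getElem_cons hlt
      have hne : left ≠ groups.length := by omega
      rw [hdropg]
      apply iff_of_false
      · simp [hne]
      · rintro ⟨i, hm, ht⟩
        have hlen := congrArg List.length hm
        simp only [List.length_take, List.length_drop] at hlen
        rw [hgd] at h2
        omega
    · have hl : left = groups.length := by omega
      subst hl
      simp [List.drop_length, CanMatch]

-- ---- B side ----

theorem buildPos_getD (nums : List Int) (c : Int) :
    (buildPos nums).getD c [] =
      ((PySem.List.enumerate nums 0).filter (fun p => p.2 == c)).map (·.1) := by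
  unfold buildPos
  rw [show (PySem.List.enumerate nums 0).foldl (fun d p => d.modify p.2 [] (· ++ [p.1])) PySem.Dict.empty
      = (((PySem.List.enumerate nums 0).map (fun p => (p.2, p.1))).foldl (fun d p => d.modify p.1 [] (· ++ [p.2])) PySem.Dict.empty)
    from by rw [List.foldl_map]]
  rw [PySem.Dict.getD_foldl_modify_append]
  simp [PySem.Dict.getD_empty, List.filter_map, List.map_map, Function.comp_def]

theorem pvAllEq_iff (nums g : List Int) (k : Nat) (hk : k + g.length ≤ nums.length) :
    pvAllEq nums g (k : Int) = true ↔ (nums.drop k).take g.length = g := by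
  unfold pvAllEq
  rw [PySem.List.pyRange_zero_natCast]
  rw [List.all_map, List.all_eq_true]
  constructor
  · intro h
    apply List.ext_getElem
    · simp; omega
    · intro t h1 h2
      have ht : t < g.length := by simpa using h2
      have := h t (List.mem_range.mpr ht)
      simp only [Function.comp_apply] at this
      rw [show (k : Int) + (t : Int) = ((k + t : Nat) : Int) from by push_cast; ring] at this
      simp only [PySem.List.pyGetD_natCast] at this
      have hkt : k + t < nums.length := by omega
      rw [List.getD_eq_getElem _ _ hkt, List.getD_eq_getElem _ _ ht] at this
      simp only [beq_iff_eq] at this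
      simp [List.getElem_take, List.getElem_drop, this]
  · intro h t ht
    have ht' : t < g.length := List.mem_range.mp ht
    simp only [Function.comp_apply]
    rw [show (k : Int) + (t : Int) = ((k + t : Nat) : Int) from by push_cast; ring]
    simp only [PySem.List.pyGetD_natCast]
    have hkt : k + t < nums.length := by omega
    rw [List.getD_eq_getElem _ _ hkt, List.getD_eq_getElem _ _ ht']
    have := congrArg (fun l => l[t]?) h
    simp only [List.getElem?_take, ht', if_pos] at this
    simp only [beq_iff_eq]
    rw [List.getElem?_drop] at this
    simp [List.getElem?_eq_getElem hkt, List.getElem?_eq_getElem ht'] at this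
    exact this

theorem canMatch_cons_abs (g : List Int) (gs : List (List Int)) (nums : List Int) (r : Nat)
    (hg : g ≠ []) :
    CanMatch (g :: gs) (nums.drop r) ↔
      ∃ j : Nat, r ≤ j ∧ j + g.length ≤ nums.length ∧ (nums.drop j).take g.length = g ∧
        CanMatch gs (nums.drop (j + g.length)) := by
  constructor
  · rintro ⟨i, hm, ht⟩
    rw [List.drop_drop] at hm ht
    refine ⟨r + i, by omega, ?_, hm, ?_⟩
    · have hlen := congrArg List.length hm
      simp only [List.length_take, List.length_drop] at hlen
      have hgl : g.length ≠ 0 := fun h0 => hg (List.eq_nil_of_length_eq_zero h0)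
      omega
    · rw [show r + i + g.length = r + (i + g.length) from by omega]
      exact ht
  · rintro ⟨j, hrj, hb, hm, ht⟩
    refine ⟨j - r, ?_, ?_⟩
    · rw [List.drop_drop, show r + (j - r) = j from by omega]
      exact hm
    · rw [List.drop_drop, show r + (j - r + g.length) = j + g.length from by omega]
      exact ht

def pvPred (nums g : List Int) (r i : Int) : Bool :=
  r ≤ i && i + (g.length : Int) ≤ (nums.length : Int) && pvAllEq nums g i

theorem findPlace_none (nums g : List Int) (r : Int) (cands : List Int)
    (h : pvFindPlace nums g cands r = none) :
    ∀ i ∈ cands, pvPred nums g r i = false := by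
  induction cands with
  | nil => simp
  | cons a rest ih =>
    unfold pvFindPlace at h
    by_cases hp : pvPred nums g r a = true
    · rw [if_pos (by simpa [pvPred] using hp)] at h
      exact absurd h (by simp)
    · rw [if_neg (by simpa [pvPred] using hp)] at h
      intro i hi
      rcases List.mem_cons.mp hi with rfl | hi'
      · simpa using hp
      · exact ih h i hi'

theorem findPlace_some (nums g : List Int) (r : Int) (cands : List Int)
    (hpw : cands.Pairwise (· < ·)) {i : Int}
    (h : pvFindPlace nums g cands r = some i) :
    i ∈ cands ∧ pvPred nums g r i = true ∧ ∀ j ∈ cands, pvPred nums g r j = true → i ≤ j := by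
  induction cands with
  | nil => exact absurd h (by simp [pvFindPlace])
  | cons a rest ih =>
    unfold pvFindPlace at h
    by_cases hp : pvPred nums g r a = true
    · rw [if_pos (by simpa [pvPred] using hp)] at h
      obtain rfl : a = i := by injection h
      refine ⟨List.mem_cons_self, hp, ?_⟩
      intro j hj _
      rcases List.mem_cons.mp hj with rfl | hj'
      · exact le_rfl
      · exact le_of_lt ((List.pairwise_cons.mp hpw).1 j hj')
    · rw [if_neg (by simpa [pvPred] using hp)] at h
      obtain ⟨hmem, hpi, hmin⟩ := ih (List.pairwise_cons.mp hpw).2 h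
      refine ⟨List.mem_cons_of_mem _ hmem, hpi, ?_⟩
      intro j hj hpj
      rcases List.mem_cons.mp hj with rfl | hj'
      · exact absurd hpj hp
      · exact hmin j hj' hpj

theorem mem_cands (nums : List Int) (c x : Int) :
    (x ∈ ((PySem.List.enumerate nums 0).filter (fun p => p.2 == c)).map (·.1)) ↔
      ∃ k : Nat, k < nums.length ∧ x = (k : Int) ∧ nums[k]? = some c := by
  simp only [List.mem_map, List.mem_filter, PySem.List.mem_enumerate_iff]
  constructor
  · rintro ⟨p, ⟨⟨k, hk, rfl⟩, hc⟩, rfl⟩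
    exact ⟨k, hk, by simp, by simp [List.getElem?_eq_getElem hk, beq_iff_eq] at hc ⊢; exact hc⟩
  · rintro ⟨k, hk, rfl, hc⟩
    refine ⟨(0 + (k : Int), nums[k]), ⟨⟨k, hk, rfl⟩, ?_⟩, by simp⟩
    simp [List.getElem?_eq_getElem hk] at hc
    simp [hc]

theorem cands_pairwise (nums : List Int) (c : Int) :
    (((PySem.List.enumerate nums 0).filter (fun p => p.2 == c)).map (·.1)).Pairwise (· < ·) := by
  rw [List.pairwise_map]
  exact (PySem.List.pairwise_lt_enumerate nums 0).filter _

theorem head_of_match (nums : List Int) (g0 : Int) (gt : List Int) (j : Nat)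
    (hj : j < nums.length)
    (hm : (nums.drop j).take (g0 :: gt).length = g0 :: gt) : nums[j]? = some g0 := by
  have := congrArg (fun l => l[0]?) hm
  simp only [List.getElem?_take, List.getElem?_drop, List.length_cons] at this
  simpa [Nat.succ_pos, List.getElem?_eq_getElem hj] using this

theorem loopB (nums : List Int) (gs : List (List Int)) :
    ∀ r : Nat, r ≤ nums.length →
      (canChooseAltLoop nums (buildPos nums) gs ((r : Nat) : Int) = true ↔
        CanMatch gs (nums.drop r)) := by
  induction gs with
  | nil => intro r hr; simp [canChooseAltLoop, CanMatch]
  | cons g gs ih =>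
    intro r hr
    by_cases hg0 : g.length = 0
    · have hgnil : g = [] := List.eq_nil_of_length_eq_zero hg0
      subst hgnil
      rw [show canChooseAltLoop nums (buildPos nums) ([] :: gs) ((r : Nat) : Int)
          = canChooseAltLoop nums (buildPos nums) gs ((r : Nat) : Int) from by
        simp [canChooseAltLoop]]
      rw [ih r hr]
      constructor
      · intro h
        exact ⟨0, by simp, by simpa using h⟩
      · rintro ⟨i, _, ht⟩
        simp only [List.length_nil, Nat.add_zero] at ht
        exact canMatch_of_drop _ _ _ ht
    · have hg : g ≠ [] := fun h => hg0 (by simp [h])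
      obtain ⟨g0, gt, rfl⟩ := List.exists_cons_of_ne_nil hg
      have hget0 : PySem.List.pyGetD (g0 :: gt) 0 0 = g0 := by
        simp [PySem.List.pyGetD_zero]
      set cands := ((PySem.List.enumerate nums 0).filter (fun p => p.2 == g0)).map (·.1) with hcands
      have hloop : canChooseAltLoop nums (buildPos nums) ((g0 :: gt) :: gs) ((r : Nat) : Int)
          = match pvFindPlace nums (g0 :: gt) cands ((r : Nat) : Int) with
            | none => false
            | some i => canChooseAltLoop nums (buildPos nums) gs (i + ((g0 :: gt).length : Int)) := by
        simp only [canChooseAltLoop, if_neg hg0, hget0, buildPos_getD, hcands]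
      rw [hloop]
      cases hfp : pvFindPlace nums (g0 :: gt) cands ((r : Nat) : Int) with
      | none =>
        have hnone := findPlace_none _ _ _ _ hfp
        apply iff_of_false (by simp)
        rw [canMatch_cons_abs _ _ _ _ (by simp)]
        rintro ⟨j, hrj, hb, hm, _⟩
        have hjn : j < nums.length := by simp only [List.length_cons] at hb; omega
        have hjc : ((j : Nat) : Int) ∈ cands := by
          rw [hcands, mem_cands]
          exact ⟨j, hjn, rfl, head_of_match nums g0 gt j hjn hm⟩
        have := hnone _ hjc
        rw [pvPred] at this
        have hall : pvAllEq nums (g0 :: gt) ((j : Nat) : Int) = true :=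
          (pvAllEq_iff nums (g0 :: gt) j hb).mpr hm
        simp only [hall, Bool.and_true, Bool.and_eq_false_iff, decide_eq_false_iff_not] at this
        rcases this with h1 | h2
        · exact h1 (by exact_mod_cast hrj)
        · exact h2 (by omega)
      | some i =>
        obtain ⟨hmem, hpred, hmin⟩ := findPlace_some _ _ _ _ (cands_pairwise nums g0) hfp
        rw [mem_cands] at hmem
        obtain ⟨k, hkn, rfl, hkc⟩ := hmem
        rw [pvPred] at hpred
        simp only [Bool.and_eq_true, decide_eq_true_eq] at hpred
        obtain ⟨⟨hrk, hkb⟩, hall⟩ := hpred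
        have hrk' : r ≤ k := by exact_mod_cast hrk
        have hkb' : k + (g0 :: gt).length ≤ nums.length := by
          omega
        have hmk : (nums.drop k).take (g0 :: gt).length = g0 :: gt :=
          (pvAllEq_iff nums (g0 :: gt) k hkb').mp hall
        have hcast : ((k : Nat) : Int) + (((g0 :: gt).length : Nat) : Int)
            = (((k + (g0 :: gt).length : Nat)) : Int) := by push_cast; ring
        show canChooseAltLoop nums (buildPos nums) gs (((k : Nat) : Int) + (((g0 :: gt).length : Nat) : Int)) = true ↔ _
        rw [hcast, ih (k + (g0 :: gt).length) hkb']
        rw [canMatch_cons_abs _ _ _ _ (by simp)]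
        constructor
        · intro h
          exact ⟨k, hrk', hkb', hmk, h⟩
        · rintro ⟨j, hrj, hb, hm, ht⟩
          have hjn : j < nums.length := by simp only [List.length_cons] at hb; omega
          have hjc : ((j : Nat) : Int) ∈ cands := by
            rw [hcands, mem_cands]
            exact ⟨j, hjn, rfl, head_of_match nums g0 gt j hjn hm⟩
          have hpj : pvPred nums (g0 :: gt) ((r : Nat) : Int) ((j : Nat) : Int) = true := by
            rw [pvPred]
            have hall' : pvAllEq nums (g0 :: gt) ((j : Nat) : Int) = true :=
              (pvAllEq_iff nums (g0 :: gt) j hb).mpr hm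
            simp only [hall', Bool.and_true, Bool.and_eq_true, decide_eq_true_eq]
            constructor
            · exact_mod_cast hrj
            · simp only [List.length_cons] at hb ⊢; push_cast; omega
          have hkj : k ≤ j := by exact_mod_cast hmin _ hjc hpj
          have : CanMatch gs ((nums.drop (k + (g0 :: gt).length)).drop (j - k)) := by
            rw [List.drop_drop, show k + (g0 :: gt).length + (j - k) = j + (g0 :: gt).length from by omega]
            exact ht
          exact canMatch_of_drop _ _ _ this

-- ===== VERDICT (by name: the statement is the Claim_ definition above) =====
theorem canChoose_spec : Claim_equal_canChoose := by
  intro groups nums _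
  unfold Spec_canChoose canChoose canChoose_alt
  rw [Bool.eq_iff_iff]
  have hA := loopA groups nums 0 0 (by omega) (by omega)
  have hB := loopB nums groups 0 (by omega)
  simp only [List.drop_zero, Nat.cast_zero] at hA hB
  rw [hA, hB]
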